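-- pv_equiv track=rewrite | github.com/nk-knvlv/courses_stuff | src/tasks_5.py | get_interval_dividers
-- ===== SOURCE A (Python) =====
-- from math import sqrt
--
-- def get_interval_dividers(x, y):
--     dividers_dict = {}
--     for el in range(x, y + 1):
--         dividers_dict[el] = []
--         for divider in range(2, int(sqrt(el)) + 1):
--             if el % divider == 0:
--                 dividers_dict[el].append(divider)
--                 if divider != el // divider:  # Добавляем сопряженный делитель
--                     dividers_dict[el].append(el // divider)
--     return dividers_dict
-- ===== SOURCE B (Python) =====
-- from math import isqrt
--
-- def get_interval_dividers(x, y):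
--     # divisor sieve: each candidate divider d walks its multiples m in [x, y]
--     # (starting no lower than d*d), extending m's list with d and the conjugate
--     # m // d; outer d ascending reproduces the trial-division order per element
--     result = {el: [] for el in range(x, y + 1)}
--     if x > y:  # empty interval: nothing to sieve
--         return result
--     for d in range(2, isqrt(max(y, 0)) + 1):
--         start = ((max(x, d * d) + d - 1) // d) * d  # least multiple of d >= max(x, d*d)
--         for m in range(start, y + 1, d):
--             q = m // d
--             result[m] += [d] if d == q else [d, q]
--     return result
-- ===== Notes on version B (the rewrite author's own statement) =====
-- stated objective: alternative
-- what changed: Replaces A's per-element trial division up to sqrt(el) by a divisor sieve: each divider d walks its multiples in [max(x,d*d), y] once, extending the multiple's list with d and the conjugate m//d; outer d ascending keeps A's per-element order (asymptotically fewer operations on wide intervals, but a timing run could not confirm a speed-up at that run's top size, so none is claimed).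
import Mathlib
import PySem

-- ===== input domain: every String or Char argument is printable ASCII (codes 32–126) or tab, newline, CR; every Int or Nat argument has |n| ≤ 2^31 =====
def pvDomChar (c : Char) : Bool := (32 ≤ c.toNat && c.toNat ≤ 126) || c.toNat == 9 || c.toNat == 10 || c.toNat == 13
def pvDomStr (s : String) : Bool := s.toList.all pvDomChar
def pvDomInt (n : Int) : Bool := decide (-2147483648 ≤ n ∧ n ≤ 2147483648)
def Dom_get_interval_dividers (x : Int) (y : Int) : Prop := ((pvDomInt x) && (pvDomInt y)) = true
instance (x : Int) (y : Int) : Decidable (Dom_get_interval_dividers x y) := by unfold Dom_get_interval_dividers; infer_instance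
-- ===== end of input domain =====

-- B replaces A's per-element trial division by a divisor sieve over [x, y] (same dict, per-element lists in the same order).

-- ===== PORT A =====
-- inner loop of A: trial division of el by divider = 2 .. int(sqrt(el));
-- Nat.sqrt el.toNat = int(math.sqrt(el)) exactly for 0 ≤ el ≤ 2^31 (negative el, where math.sqrt raises ValueError, is outside Pre_)
def gidTrial (el : Int) : List Int :=
  (PySem.List.pyRange 2 ((Nat.sqrt el.toNat : Int) + 1) 1).foldl
    (fun acc divider =>
      if PySem.Int.mod el divider = 0 then
        (acc ++ [divider]) ++
          (if divider ≠ PySem.Int.floordiv el divider then [PySem.Int.floordiv el divider] else [])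
      else acc) []

def get_interval_dividers (x : Int) (y : Int) : List (Int × List Int) :=
  ((PySem.List.pyRange x (y + 1) 1).foldl
      (fun d el => d.insert el (gidTrial el)) PySem.Dict.empty).items

-- ===== PORT B =====
-- [d] if d == q else [d, q]  (the chunk Source B appends for a multiple m of divider d)
def gidChunk (d m : Int) : List Int :=
  let q := PySem.Int.floordiv m d
  if d = q then [d] else [d, q]

-- ((max(x, d*d) + d - 1) // d) * d : least multiple of d that is ≥ max(x, d*d)
def gidStart (x d : Int) : Int := PySem.Int.floordiv (max x (d * d) + d - 1) d * d

def get_interval_dividers_alt (x : Int) (y : Int) : List (Int × List Int) :=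
  let result : PySem.Dict Int (List Int) :=
    (PySem.List.pyRange x (y + 1) 1).foldl
      (fun t el => t.insert el ([] : List Int)) PySem.Dict.empty
  if x > y then result.items  -- empty interval: nothing to sieve
  else
    ((PySem.List.pyRange 2 ((Nat.sqrt (max y 0).toNat : Int) + 1) 1).foldl
      (fun t d =>
        (PySem.List.pyRange (gidStart x d) (y + 1) d).foldl
          (fun t m => t.modify m [] (fun s => s ++ gidChunk d m)) t) result).items

-- ===== PRECONDITION & SPEC =====
-- Pre_ excludes exactly the inputs on which A raises: x < 0 with x ≤ y makes math.sqrt raise ValueError on el = x.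
def Pre_get_interval_dividers (x : Int) (y : Int) : Prop := 0 ≤ x ∨ y < x
instance (x : Int) (y : Int) : Decidable (Pre_get_interval_dividers x y) := by
  unfold Pre_get_interval_dividers; infer_instance
def pvWitness_get_interval_dividers : Int × Int := (2, 12)

def Spec_get_interval_dividers (x : Int) (y : Int) (out : List (Int × List Int)) : Prop :=
  out = get_interval_dividers_alt x y
instance (x : Int) (y : Int) (out : List (Int × List Int)) : Decidable (Spec_get_interval_dividers x y out) := by
  unfold Spec_get_interval_dividers; infer_instance

-- ===== CLAIM (what is proved, stated in full; the proofs are below) =====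
def Claim_equal_get_interval_dividers : Prop := ∀ (x : Int) (y : Int), Dom_get_interval_dividers x y → Pre_get_interval_dividers x y → Spec_get_interval_dividers x y (get_interval_dividers x y)

-- ===== LEMMAS AND PROOFS =====


theorem gid_getD_inner (l : List Int) (f : Int → List Int) (t : PySem.Dict Int (List Int)) (c : Int) :
    (l.foldl (fun t m => t.modify m [] (fun s => s ++ f m)) t).getD c [] =
      t.getD c [] ++ (l.filter (fun m => m == c)).flatMap f := by
  induction l generalizing t with
  | nil => simp
  | cons m l ih =>
    simp only [List.foldl_cons, ih, List.filter_cons]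
    by_cases h : m = c
    · subst h; simp
    · simp [PySem.Dict.getD_modify, h, Ne.symm h]

theorem gid_keys_inner (l : List Int) (f : Int → List Int) (t : PySem.Dict Int (List Int))
    (h : ∀ m ∈ l, m ∈ t.keys) :
    (l.foldl (fun t m => t.modify m [] (fun s => s ++ f m)) t).keys = t.keys := by
  induction l generalizing t with
  | nil => simp
  | cons m l ih =>
    have hm : m ∈ t.keys := h m (by simp)
    have hk : (t.modify m [] (fun s => s ++ f m)).keys = t.keys := by
      rw [PySem.Dict.keys_modify, PySem.Dict.keys_insert_of_contains]
      exact (PySem.Dict.contains_iff_mem_keys t m).mpr hm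
    simp only [List.foldl_cons]
    rw [ih _ (by intro a ha; rw [hk]; exact h a (by simp [ha])), hk]

theorem gid_init_getD (l : List Int) (t : PySem.Dict Int (List Int)) (c : Int)
    (h : t.getD c [] = []) :
    (l.foldl (fun t el => t.insert el ([] : List Int)) t).getD c [] = [] := by
  induction l generalizing t with
  | nil => simpa
  | cons m l ih =>
    simp only [List.foldl_cons]
    exact ih _ (by rw [PySem.Dict.getD_insert]; split <;> simp [h])

theorem gid_filter_nodup {l : List Int} (h : l.Nodup) (c : Int) :
    l.filter (fun m => m == c) = if c ∈ l then [c] else [] := by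
  induction l with
  | nil => simp
  | cons m l ih =>
    simp only [List.filter_cons]
    rcases List.nodup_cons.mp h with ⟨hm, hl⟩
    by_cases hc : m = c
    · subst hc
      have hnil : List.filter (fun a => a == m) l = [] := by
        rw [List.filter_eq_nil_iff]
        intro a ha
        simp only [beq_iff_eq]
        intro hh; subst hh; exact hm ha
      simp [hnil]
    · simp [hc, ih hl, List.mem_cons, Ne.symm hc]

theorem gid_nodup_pyRange_of_pos (a b : Int) {s : Int} (hs : 0 < s) :
    (PySem.List.pyRange a b s).Nodup := by
  rw [PySem.List.pyRange_of_pos a b hs]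
  refine (List.nodup_range).map ?_
  intro i j hij
  have h1 : s * (i : Int) = s * (j : Int) := by linarith
  have h2 : (i : Int) = (j : Int) := mul_left_cancel₀ (ne_of_gt hs) h1
  exact_mod_cast h2

theorem gid_getD_outer (ds : List Int) (mult : Int → List Int) (f : Int → Int → List Int)
    (t : PySem.Dict Int (List Int)) (c : Int) :
    (ds.foldl (fun t d =>
        (mult d).foldl (fun t m => t.modify m [] (fun s => s ++ f d m)) t) t).getD c [] =
      t.getD c [] ++ ds.flatMap (fun d => ((mult d).filter (fun m => m == c)).flatMap (f d)) := by
  induction ds generalizing t with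
  | nil => simp
  | cons d ds ih =>
    simp only [List.foldl_cons, List.flatMap_cons, ih, gid_getD_inner, List.append_assoc]

theorem gid_keys_outer (ds : List Int) (mult : Int → List Int) (f : Int → Int → List Int)
    (t : PySem.Dict Int (List Int)) (h : ∀ d ∈ ds, ∀ m ∈ mult d, m ∈ t.keys) :
    (ds.foldl (fun t d =>
        (mult d).foldl (fun t m => t.modify m [] (fun s => s ++ f d m)) t) t).keys = t.keys := by
  induction ds generalizing t with
  | nil => simp
  | cons d ds ih =>
    have hk : ((mult d).foldl (fun t m => t.modify m [] (fun s => s ++ f d m)) t).keys = t.keys :=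
      gid_keys_inner _ _ _ (h d (by simp))
    simp only [List.foldl_cons]
    rw [ih _ (by intro a ha m hm; rw [hk]; exact h a (by simp [ha]) m hm), hk]

theorem gid_mem_mult (x y d c : Int) (hd : 0 < d) :
    c ∈ PySem.List.pyRange (gidStart x d) (y + 1) d ↔ (x ≤ c ∧ d * d ≤ c ∧ c ≤ y ∧ d ∣ c) := by
  rw [PySem.List.mem_pyRange_iff_of_pos hd]
  unfold gidStart
  set M := max x (d * d) with hM
  set q0 := PySem.Int.floordiv (M + d - 1) d with hq0
  have hbr : q0 * d ≤ M + d - 1 ∧ M + d - 1 < (q0 + 1) * d := (PySem.Int.floordiv_eq_iff_of_pos hd).mp hq0.symm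
  constructor
  · rintro ⟨h1, h2, k, hk⟩
    have hdc : d ∣ c := ⟨(q0 + k), by linear_combination hk⟩
    refine ⟨?_, ?_, by omega, hdc⟩
    · have : M ≤ q0 * d := by nlinarith [hbr.1, hbr.2]
      omega
    · have : M ≤ q0 * d := by nlinarith [hbr.1, hbr.2]
      omega
  · rintro ⟨h1, h2, h3, k, hk⟩
    have hMc : M ≤ c := by omega
    have hq0k : q0 ≤ k := by nlinarith [hbr.1, hbr.2]
    refine ⟨by nlinarith, by omega, k - q0, by linear_combination hk⟩

theorem gid_flatMap_congr {α β : Type} {l : List α} {f g : α → List β}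
    (h : ∀ a ∈ l, f a = g a) : l.flatMap f = l.flatMap g := by
  induction l with
  | nil => rfl
  | cons a l ih =>
    simp only [List.flatMap_cons, h a (by simp), ih (fun a ha => h a (by simp [ha]))]

theorem gid_trial_flatMap (el : Int) :
    gidTrial el = (PySem.List.pyRange 2 ((Nat.sqrt el.toNat : Int) + 1) 1).flatMap
      (fun d => if PySem.Int.mod el d = 0 then gidChunk d el else []) := by
  unfold gidTrial
  have hbody : (fun (acc : List Int) (divider : Int) =>
      if PySem.Int.mod el divider = 0 then
        (acc ++ [divider]) ++
          (if divider ≠ PySem.Int.floordiv el divider then [PySem.Int.floordiv el divider] else [])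
      else acc)
      = fun acc d => acc ++ (if PySem.Int.mod el d = 0 then gidChunk d el else []) := by
    funext acc d
    by_cases h : PySem.Int.mod el d = 0
    · rw [if_pos h, if_pos h]
      by_cases h2 : d = PySem.Int.floordiv el d
      · rw [if_neg (not_not_intro h2)]
        simp only [gidChunk]
        rw [if_pos h2]
        simp
      · rw [if_pos h2]
        simp only [gidChunk]
        rw [if_neg h2]
        simp
    · simp only [if_neg h, List.append_nil]
  rw [hbody, PySem.List.foldl_append_eq_flatMap]
  simp

-- d*d ≤ el ↔ d ≤ sqrt(el) transported to Int (0 ≤ el, 0 < d)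
theorem gid_sq_le_iff (el d : Int) (hel : 0 ≤ el) (hd : 0 < d) :
    d * d ≤ el ↔ d ≤ (Nat.sqrt el.toNat : Int) := by
  have hdn : ((d.toNat : Int)) = d := Int.toNat_of_nonneg (le_of_lt hd)
  constructor
  · intro h
    have h1 : d.toNat * d.toNat ≤ el.toNat := by
      zify
      rw [hdn, Int.toNat_of_nonneg hel]
      exact h
    have := Nat.le_sqrt.mpr h1
    omega
  · intro h
    have h1 : d.toNat ≤ Nat.sqrt el.toNat := by omega
    have h2 : ((d.toNat * d.toNat : Nat) : Int) ≤ ((el.toNat : Nat) : Int) :=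
      by exact_mod_cast Nat.le_sqrt.mp h1
    push_cast at h2
    rw [hdn, Int.toNat_of_nonneg hel] at h2
    exact h2

theorem gid_per_element (x y el : Int) (hx : 0 ≤ x) (h1 : x ≤ el) (h2 : el ≤ y) :
    (PySem.List.pyRange 2 ((Nat.sqrt (max y 0).toNat : Int) + 1) 1).flatMap
      (fun d => ((PySem.List.pyRange (gidStart x d) (y + 1) d).filter (fun m => m == el)).flatMap
        (gidChunk d)) = gidTrial el := by
  have hy0 : max y 0 = y := by omega
  have hel0 : (0 : Int) ≤ el := by omega
  have hsmono : (Nat.sqrt el.toNat : Int) ≤ (Nat.sqrt y.toNat : Int) := by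
    have : el.toNat ≤ y.toNat := by omega
    exact_mod_cast Nat.sqrt_le_sqrt this
  rw [hy0, gid_trial_flatMap]
  -- rewrite each sieve term to an if-form
  have hterm : ∀ d, 2 ≤ d →
      ((PySem.List.pyRange (gidStart x d) (y + 1) d).filter (fun m => m == el)).flatMap (gidChunk d)
      = if d * d ≤ el ∧ d ∣ el then gidChunk d el else [] := by
    intro d hd
    have hdpos : (0 : Int) < d := by omega
    rw [gid_filter_nodup (gid_nodup_pyRange_of_pos _ _ hdpos) el]
    by_cases hm : el ∈ PySem.List.pyRange (gidStart x d) (y + 1) d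
    · have := (gid_mem_mult x y d el hdpos).mp hm
      simp [hm, this.2.1, this.2.2.2]
    · have hnot := hm
      rw [gid_mem_mult x y d el hdpos] at hnot
      simp only [if_neg hm, List.flatMap_nil]
      exact (if_neg (fun hc : d * d ≤ el ∧ d ∣ el => hnot ⟨h1, hc.1, h2, hc.2⟩)).symm
  rw [gid_flatMap_congr (fun d hd => hterm d (PySem.List.mem_pyRange_one.mp hd).1)]
  by_cases hsel : 1 ≤ (Nat.sqrt el.toNat : Int)
  · rw [PySem.List.pyRange_one_append 2 ((Nat.sqrt el.toNat : Int) + 1) ((Nat.sqrt y.toNat : Int) + 1)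
        (by omega) (by omega), List.flatMap_append]
    have htail : (PySem.List.pyRange ((Nat.sqrt el.toNat : Int) + 1) ((Nat.sqrt y.toNat : Int) + 1) 1).flatMap
        (fun d => if d * d ≤ el ∧ d ∣ el then gidChunk d el else []) = [] := by
      rw [List.flatMap_eq_nil_iff]
      intro d hd
      have hm := PySem.List.mem_pyRange_one.mp hd
      have : ¬ d * d ≤ el := by
        intro hc
        have := (gid_sq_le_iff el d hel0 (by omega)).mp hc
        omega
      simp [this]
    rw [htail, List.append_nil]
    apply gid_flatMap_congr
    intro d hd
    have hm := PySem.List.mem_pyRange_one.mp hd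
    have hdd : d * d ≤ el := (gid_sq_le_iff el d hel0 (by omega)).mpr (by omega)
    simp [hdd, PySem.Int.mod_eq_zero_iff_dvd]
  · rw [PySem.List.pyRange_one_eq_nil (by omega : (Nat.sqrt el.toNat : Int) + 1 ≤ 2)]
    rw [List.flatMap_nil, List.flatMap_eq_nil_iff]
    intro d hd
    have hm := PySem.List.mem_pyRange_one.mp hd
    have hel4 : el ≤ 0 := by
      have : Nat.sqrt el.toNat = 0 := by omega
      have := Nat.sqrt_eq_zero.mp this
      omega
    have : ¬ d * d ≤ el := by nlinarith [hm.1]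
    simp [this]

-- ===== VERDICT (by name: the statement is the Claim_ definition above) =====
theorem get_interval_dividers_spec : Claim_equal_get_interval_dividers := by
  intro x y _ hpre
  unfold Spec_get_interval_dividers
  unfold get_interval_dividers get_interval_dividers_alt
  by_cases hxy : x > y
  · rw [if_pos hxy, PySem.List.pyRange_one_eq_nil (by omega : y + 1 ≤ x)]
    rfl
  rw [if_neg hxy]
  have hRnodup : (PySem.List.pyRange x (y + 1) 1).Nodup := PySem.List.nodup_pyRange_one x (y + 1)
  -- A's items
  have hA : ((PySem.List.pyRange x (y + 1) 1).foldl
      (fun d el => d.insert el (gidTrial el)) PySem.Dict.empty).items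
      = (PySem.List.pyRange x (y + 1) 1).map (fun el => (el, gidTrial el)) := by
    have := PySem.Dict.items_foldl_insert_fresh (PySem.List.pyRange x (y + 1) 1)
      (fun a => a) (fun a => gidTrial a) PySem.Dict.empty
      (by intro a _; simp) (by simpa using hRnodup)
    simpa using this
  -- B's initial dict
  have hI : ((PySem.List.pyRange x (y + 1) 1).foldl
      (fun t el => t.insert el ([] : List Int)) PySem.Dict.empty).items
      = (PySem.List.pyRange x (y + 1) 1).map (fun el => (el, ([] : List Int))) := by
    have := PySem.Dict.items_foldl_insert_fresh (PySem.List.pyRange x (y + 1) 1)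
      (fun a => a) (fun _ => ([] : List Int)) PySem.Dict.empty
      (by intro a _; simp) (by simpa using hRnodup)
    simpa using this
  have hkeys0 : ((PySem.List.pyRange x (y + 1) 1).foldl
      (fun t el => t.insert el ([] : List Int)) PySem.Dict.empty).keys
      = PySem.List.pyRange x (y + 1) 1 := by
    simp only [PySem.Dict.keys, hI, List.map_map]
    exact List.map_id _
  -- keys survive the sieve
  have hmem : ∀ d ∈ PySem.List.pyRange 2 ((Nat.sqrt (max y 0).toNat : Int) + 1) 1,
      ∀ m ∈ PySem.List.pyRange (gidStart x d) (y + 1) d,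
      m ∈ ((PySem.List.pyRange x (y + 1) 1).foldl
        (fun t el => t.insert el ([] : List Int)) PySem.Dict.empty).keys := by
    intro d hd m hm
    have hd2 := (PySem.List.mem_pyRange_one.mp hd).1
    have := (gid_mem_mult x y d m (by omega)).mp hm
    rw [hkeys0, PySem.List.mem_pyRange_one]
    omega
  have hkeysF := gid_keys_outer (PySem.List.pyRange 2 ((Nat.sqrt (max y 0).toNat : Int) + 1) 1)
    (fun d => PySem.List.pyRange (gidStart x d) (y + 1) d) gidChunk
    ((PySem.List.pyRange x (y + 1) 1).foldl
      (fun t el => t.insert el ([] : List Int)) PySem.Dict.empty) hmem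
  rw [hkeys0] at hkeysF
  have hitems := PySem.Dict.items_eq_map_keys
    ((PySem.List.pyRange 2 ((Nat.sqrt (max y 0).toNat : Int) + 1) 1).foldl
      (fun t d =>
        (PySem.List.pyRange (gidStart x d) (y + 1) d).foldl
          (fun t m => t.modify m [] (fun s => s ++ gidChunk d m)) t)
      ((PySem.List.pyRange x (y + 1) 1).foldl
        (fun t el => t.insert el ([] : List Int)) PySem.Dict.empty))
    (by rw [hkeysF]; exact hRnodup) ([] : List Int)
  rw [hitems, hkeysF, hA]
  apply List.map_congr_left
  intro el hel
  have hmel := PySem.List.mem_pyRange_one.mp hel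
  have hx0 : 0 ≤ x := by
    rcases hpre with h | h
    · exact h
    · omega
  refine Prod.ext rfl ?_
  show gidTrial el = _
  rw [gid_getD_outer (PySem.List.pyRange 2 ((Nat.sqrt (max y 0).toNat : Int) + 1) 1)
      (fun d => PySem.List.pyRange (gidStart x d) (y + 1) d) gidChunk _ el]
  rw [gid_init_getD _ _ _ (by simp)]
  rw [List.nil_append]
  exact (gid_per_element x y el hx0 hmel.1 (by omega)).symm
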